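-- pv_equiv track=rewrite | github.com/KotonBads/LC-Solver | unscrambler.py | Word2Vect
-- ===== SOURCE A (Python) =====
-- def Word2Vect(word):
--     l = ['a','b','c','d','e','f','g','h','i','j','k','l','m','n','o','p','q','r','s','t','u','v','w','x','y','z']
--     v = [0, 0, 0, 0, 0, 0, 0, 0, 0, 0, 0, 0, 0, 0, 0, 0, 0, 0, 0, 0, 0, 0, 0, 0, 0, 0]
--     w = word.lower()
--     wl = list(w)
--     for item in wl:
--         if item in l:
--             ind = l.index(item)
--             v[ind] += 1
--     return v
-- ===== SOURCE B (Python) =====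
-- def Word2Vect(word):
--     w = list(word.lower())
--     return [w.count(c) for c in 'abcdefghijklmnopqrstuvwxyz']
-- ===== Notes on version B (the rewrite author's own statement) =====
-- stated objective: idiomatic
-- what changed: Instead of looping over the word's characters and incrementing cells of a preallocated 26-slot vector via list.index lookups, B loops over the fixed alphabet and computes each cell directly with list.count, scanning the word once per letter.
import Mathlib
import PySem

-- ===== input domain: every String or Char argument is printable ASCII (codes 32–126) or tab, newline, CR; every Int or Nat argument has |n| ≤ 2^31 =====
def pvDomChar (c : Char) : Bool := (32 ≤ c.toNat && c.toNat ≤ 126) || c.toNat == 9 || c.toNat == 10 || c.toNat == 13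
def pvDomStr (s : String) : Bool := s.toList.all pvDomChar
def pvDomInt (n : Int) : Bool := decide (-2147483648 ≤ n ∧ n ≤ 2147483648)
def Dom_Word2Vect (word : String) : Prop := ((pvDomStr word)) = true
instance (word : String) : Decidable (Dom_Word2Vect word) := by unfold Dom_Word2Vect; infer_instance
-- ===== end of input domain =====

-- B replaces A's word-loop with index/increment on a 26-slot vector by one count per alphabet letter (idiomatic).

-- ===== PORT A =====
def Word2Vect (word : String) : List Int :=
  let l : List Char := ['a','b','c','d','e','f','g','h','i','j','k','l','m',
                        'n','o','p','q','r','s','t','u','v','w','x','y','z']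
  let v : List Int := [0, 0, 0, 0, 0, 0, 0, 0, 0, 0, 0, 0, 0,
                       0, 0, 0, 0, 0, 0, 0, 0, 0, 0, 0, 0, 0]
  let w := PySem.Str.lower word
  let wl := w.toList
  wl.foldl (fun v item =>
    if l.contains item then
      match PySem.List.index? l item with
      | some ind => PySem.List.pySetD v (ind : Int) (PySem.List.pyGetD v (ind : Int) 0 + 1)
      | none => v
    else v) v

-- ===== PORT B =====
def Word2Vect_alt (word : String) : List Int :=
  let w := (PySem.Str.lower word).toList
  "abcdefghijklmnopqrstuvwxyz".toList.map (fun c => (w.count c : Int))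

-- ===== PRECONDITION & SPEC =====
def Spec_Word2Vect (word : String) (out : List Int) : Prop := out = Word2Vect_alt word
instance (word : String) (out : List Int) : Decidable (Spec_Word2Vect word out) := by unfold Spec_Word2Vect; infer_instance

-- ===== CLAIM (what is proved, stated in full; the proofs are below) =====
def Claim_equal_Word2Vect : Prop := ∀ (word : String), Dom_Word2Vect word → Spec_Word2Vect word (Word2Vect word)

-- ===== LEMMAS AND PROOFS =====

-- A's loop step, parametric in the alphabet.
def pvStep (l : List Char) (v : List Int) (item : Char) : List Int :=
  if l.contains item then
    match PySem.List.index? l item with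
    | some ind => PySem.List.pySetD v (ind : Int) (PySem.List.pyGetD v (ind : Int) 0 + 1)
    | none => v
  else v

lemma pvStep_counts (alph : List Char) (hn : alph.Nodup) (p : List Char) (item : Char) :
    pvStep alph (alph.map fun c => (p.count c : Int)) item
      = alph.map fun c => ((p ++ [item]).count c : Int) := by
  unfold pvStep
  by_cases hmem : item ∈ alph
  · rw [if_pos (by simpa using hmem)]
    obtain ⟨ind, hind⟩ := Option.isSome_iff_exists.mp ((PySem.List.index?_isSome_iff alph item).2 hmem)
    rw [hind]; dsimp only
    obtain ⟨hk, hget, -⟩ := PySem.List.getElem_of_index?_eq_some hind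
    rw [PySem.List.pySetD_natCast]
    apply List.ext_getElem (by simp)
    intro j hj hj'
    have hjlen : j < alph.length := by simpa using hj'
    rw [List.getElem_set, List.getElem_map]
    by_cases hji : ind = j
    · subst hji
      rw [if_pos rfl]
      simp [PySem.List.pyGetD_natCast, List.getElem?_eq_getElem hjlen,
            List.count_append, hget]
    · rw [if_neg hji, List.getElem_map]
      have hne : alph[j] ≠ item := by
        intro h
        exact hji (hn.getElem_inj_iff.mp (h.trans hget.symm)).symm
      simp [List.count_append, Ne.symm hne]
  · rw [if_neg (by simpa using hmem)]
    apply List.map_congr_left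
    intro c hc
    have : c ≠ item := fun h => hmem (h ▸ hc)
    simp [List.count_append, Ne.symm this]

lemma pvFoldl_counts (alph : List Char) (hn : alph.Nodup) (rest p : List Char) :
    rest.foldl (pvStep alph) (alph.map fun c => (p.count c : Int))
      = alph.map fun c => ((p ++ rest).count c : Int) := by
  induction rest generalizing p with
  | nil => simp
  | cons x xs ih =>
      rw [List.foldl_cons, pvStep_counts alph hn p x, ih (p ++ [x])]
      simp

-- ===== VERDICT (by name: the statement is the Claim_ definition above) =====
theorem Word2Vect_spec : Claim_equal_Word2Vect := by
  intro word _
  unfold Spec_Word2Vect Word2Vect Word2Vect_alt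
  dsimp only
  have h0 : ([0, 0, 0, 0, 0, 0, 0, 0, 0, 0, 0, 0, 0,
              0, 0, 0, 0, 0, 0, 0, 0, 0, 0, 0, 0, 0] : List Int)
      = (['a','b','c','d','e','f','g','h','i','j','k','l','m',
          'n','o','p','q','r','s','t','u','v','w','x','y','z'].map
           fun c => (([] : List Char).count c : Int)) := by decide
  have halph : ("abcdefghijklmnopqrstuvwxyz".toList)
      = ['a','b','c','d','e','f','g','h','i','j','k','l','m',
         'n','o','p','q','r','s','t','u','v','w','x','y','z'] := by decide
  rw [halph, h0]
  have key := pvFoldl_counts ['a','b','c','d','e','f','g','h','i','j','k','l','m',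
         'n','o','p','q','r','s','t','u','v','w','x','y','z'] (by decide)
         (PySem.Str.lower word).toList []
  rw [List.nil_append] at key
  change List.foldl (pvStep ['a','b','c','d','e','f','g','h','i','j','k','l','m',
         'n','o','p','q','r','s','t','u','v','w','x','y','z']) _ _ = _
  exact key
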